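-- pv_equiv track=rewrite | github.com/chiillbro/LC-Python | 2478-longest-nice-subarray/2478-longest-nice-subarray.py | _can_form_nice_subarray
-- ===== SOURCE A (Python) =====
-- def _can_form_nice_subarray(nums, length):
--     if length <= 1: return True
--
--     for start in range(len(nums) - length + 1):
--         is_nice = True
--         bit_mask = 0
--
--         for pos in range(start, start + length):
--             if bit_mask & nums[pos] != 0:
--                 is_nice = False
--                 break
--             bit_mask |= nums[pos]
--
--         if is_nice:
--             return True
--     return False
-- ===== SOURCE B (Python) =====
-- def _can_form_nice_subarray(nums, length):
--     # Sliding window: keep the longest "nice" (pairwise AND == 0) window ending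
--     # at the current element; compare the best window length with `length`.
--     if length <= 1:
--         return True
--     mask = 0
--     window = []
--     best = 0
--     for x in nums:
--         while mask & x != 0:
--             mask ^= window.pop(0)
--         window.append(x)
--         mask |= x
--         best = max(best, len(window))
--     return best >= length
-- ===== Notes on version B (the rewrite author's own statement) =====
-- stated objective: alternative
-- what changed: A re-scans a fresh bitmask window for every start position; B makes a single sliding-window pass that maintains the current nice window (list + OR-bitmask, removing conflicting elements from the left via XOR) and compares the maximal nice-window length with the requested length.
import Mathlib
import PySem

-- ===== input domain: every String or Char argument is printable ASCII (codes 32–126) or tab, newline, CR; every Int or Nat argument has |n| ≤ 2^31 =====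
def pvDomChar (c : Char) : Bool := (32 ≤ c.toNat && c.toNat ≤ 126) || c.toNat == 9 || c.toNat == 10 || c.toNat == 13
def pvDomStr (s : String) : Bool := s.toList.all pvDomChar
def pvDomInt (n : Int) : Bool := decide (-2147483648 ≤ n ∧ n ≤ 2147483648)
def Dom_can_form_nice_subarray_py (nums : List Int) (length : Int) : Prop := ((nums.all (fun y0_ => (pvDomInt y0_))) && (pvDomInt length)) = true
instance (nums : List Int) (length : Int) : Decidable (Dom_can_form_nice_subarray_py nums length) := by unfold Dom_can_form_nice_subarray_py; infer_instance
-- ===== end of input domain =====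

-- B replaces A's per-start bitmask window re-scan by a single sliding-window pass that
-- tracks the current nice window and its OR-mask (objective: alternative algorithm).

-- ===== PORT A =====
-- inner 'for pos in range(start, start+length)' loop with its break:
-- indices visited are always in range (0 ≤ start, start+length ≤ len(nums)), so pyGetD _ _ 0 is exact there
def pvInnerA (nums : List Int) : List Int → Int → Bool
  | [], _ => true
  | p :: rest, mask =>
    let x := PySem.List.pyGetD nums p 0
    if PySem.Int.band mask x ≠ 0 then false
    else pvInnerA nums rest (PySem.Int.bor mask x)

def can_form_nice_subarray_py (nums : List Int) (length : Int) : Bool :=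
  if length ≤ 1 then true
  else
    -- 'for start in range(...): ... if is_nice: return True / return False' = any
    (PySem.List.pyRange 0 ((nums.length : Int) - length + 1)).any
      (fun start => pvInnerA nums (PySem.List.pyRange start (start + length)) 0)

-- ===== PORT B =====
-- 'while mask & x != 0: mask ^= window.pop(0)'; the [] case mirrors where Python's
-- pop(0) would raise — unreachable in B's run since mask is always the OR of window
def pvShrinkB (x : Int) (mask : Int) (window : List Int) : Int × List Int :=
  if PySem.Int.band mask x ≠ 0 then
    match window with
    | [] => (mask, [])
    | w :: ws => pvShrinkB x (PySem.Int.bxor mask w) ws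
  else (mask, window)

-- 'for x in nums:' body of B
def pvLoopB : List Int → Int → List Int → Int → Int
  | [], _, _, best => best
  | x :: rest, mask, window, best =>
    let p := pvShrinkB x mask window
    let window' := p.2 ++ [x]
    pvLoopB rest (PySem.Int.bor p.1 x) window' (max best (window'.length : Int))

def can_form_nice_subarray_py_alt (nums : List Int) (length : Int) : Bool :=
  if length ≤ 1 then true
  else decide (length ≤ pvLoopB nums 0 [] 0)

-- ===== PRECONDITION & SPEC =====
def Spec_can_form_nice_subarray_py (nums : List Int) (length : Int) (out : Bool) : Prop := out = can_form_nice_subarray_py_alt nums length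
instance (nums : List Int) (length : Int) (out : Bool) : Decidable (Spec_can_form_nice_subarray_py nums length out) := by unfold Spec_can_form_nice_subarray_py; infer_instance

-- ===== CLAIM (what is proved, stated in full; the proofs are below) =====
def Claim_equal_can_form_nice_subarray_py : Prop := ∀ (nums : List Int) (length : Int), Dom_can_form_nice_subarray_py nums length → Spec_can_form_nice_subarray_py nums length (can_form_nice_subarray_py nums length)

-- ===== LEMMAS AND PROOFS =====

-- ---- two's-complement bit identities for PySem.Int.band/bor/bxor ----

theorem pv_ldiff_add_and (m n : Nat) : Nat.ldiff m n + (m &&& n) = m := by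
  induction m using Nat.binaryRec generalizing n with
  | zero => simp [Nat.ldiff, Nat.bitwise_zero_left]
  | bit b m ih =>
    induction n using Nat.binaryRec with
    | zero => simp [Nat.ldiff, Nat.bitwise_zero_right]
    | bit c n _ =>
      rw [Nat.ldiff_bit, Nat.land_bit, Nat.bit_val, Nat.bit_val, Nat.bit_val]
      have h := ih n
      cases b <;> cases c <;> simp <;> omega

theorem pv_sub_and (m n : Nat) : m - (m &&& n) = Nat.ldiff m n := by
  have h := pv_ldiff_add_and m n
  omega

theorem pv_neg_negSucc_sub_one_toNat (n : Nat) : (-(Int.negSucc n) - 1).toNat = n := by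
  rw [Int.negSucc_eq]; omega

theorem pv_ofNat_nonneg (m : Nat) : 0 ≤ Int.ofNat m := Int.natCast_nonneg m

theorem pv_band_eq_land (a b : Int) : PySem.Int.band a b = Int.land a b := by
  rw [PySem.Int.band.eq_1]
  rcases a with m | m <;> rcases b with n | n
  · rw [if_pos (pv_ofNat_nonneg m), if_pos (pv_ofNat_nonneg n)]; rfl
  · rw [if_pos (pv_ofNat_nonneg m), if_neg (Int.negSucc_not_nonneg n).mp,
      pv_neg_negSucc_sub_one_toNat]
    show (↑(m - (m &&& n)) : Int) = _
    rw [pv_sub_and]; rfl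
  · rw [if_neg (Int.negSucc_not_nonneg m).mp, if_pos (pv_ofNat_nonneg n),
      pv_neg_negSucc_sub_one_toNat]
    show (↑(n - (n &&& m)) : Int) = _
    rw [pv_sub_and]; rfl
  · rw [if_neg (Int.negSucc_not_nonneg m).mp, if_neg (Int.negSucc_not_nonneg n).mp,
      pv_neg_negSucc_sub_one_toNat, pv_neg_negSucc_sub_one_toNat]
    show -(↑(m ||| n) : Int) - 1 = Int.negSucc (m ||| n)
    rw [Int.negSucc_eq]; ring

theorem pv_bor_eq_lor (a b : Int) : PySem.Int.bor a b = Int.lor a b := by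
  rw [PySem.Int.bor.eq_1]
  rcases a with m | m <;> rcases b with n | n
  · rw [if_pos (pv_ofNat_nonneg m), if_pos (pv_ofNat_nonneg n)]; rfl
  · rw [if_pos (pv_ofNat_nonneg m), if_neg (Int.negSucc_not_nonneg n).mp,
      pv_neg_negSucc_sub_one_toNat]
    show -(↑(n - (n &&& m)) : Int) - 1 = Int.negSucc (Nat.ldiff n m)
    rw [pv_sub_and, Int.negSucc_eq]; ring
  · rw [if_neg (Int.negSucc_not_nonneg m).mp, if_pos (pv_ofNat_nonneg n),
      pv_neg_negSucc_sub_one_toNat]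
    show -(↑(m - (m &&& n)) : Int) - 1 = Int.negSucc (Nat.ldiff m n)
    rw [pv_sub_and, Int.negSucc_eq]; ring
  · rw [if_neg (Int.negSucc_not_nonneg m).mp, if_neg (Int.negSucc_not_nonneg n).mp,
      pv_neg_negSucc_sub_one_toNat, pv_neg_negSucc_sub_one_toNat]
    show -(↑(m &&& n) : Int) - 1 = Int.negSucc (m &&& n)
    rw [Int.negSucc_eq]; ring

theorem pv_bxor_eq_xor (a b : Int) : PySem.Int.bxor a b = Int.xor a b := by
  rw [PySem.Int.bxor.eq_1]
  rcases a with m | m <;> rcases b with n | n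
  · rw [if_pos (pv_ofNat_nonneg m), if_pos (pv_ofNat_nonneg n)]; rfl
  · rw [if_pos (pv_ofNat_nonneg m), if_neg (Int.negSucc_not_nonneg n).mp,
      pv_neg_negSucc_sub_one_toNat]
    show -(↑(m ^^^ n) : Int) - 1 = Int.negSucc (m ^^^ n)
    rw [Int.negSucc_eq]; ring
  · rw [if_neg (Int.negSucc_not_nonneg m).mp, if_pos (pv_ofNat_nonneg n),
      pv_neg_negSucc_sub_one_toNat]
    show -(↑(m ^^^ n) : Int) - 1 = Int.negSucc (m ^^^ n)
    rw [Int.negSucc_eq]; ring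
  · rw [if_neg (Int.negSucc_not_nonneg m).mp, if_neg (Int.negSucc_not_nonneg n).mp,
      pv_neg_negSucc_sub_one_toNat, pv_neg_negSucc_sub_one_toNat]
    rfl

theorem pv_tb_band (a b : Int) (k : Nat) :
    (PySem.Int.band a b).testBit k = (a.testBit k && b.testBit k) := by
  rw [pv_band_eq_land]; exact Int.testBit_land a b k

theorem pv_tb_bor (a b : Int) (k : Nat) :
    (PySem.Int.bor a b).testBit k = (a.testBit k || b.testBit k) := by
  rw [pv_bor_eq_lor]; exact Int.testBit_lor a b k

theorem pv_tb_bxor (a b : Int) (k : Nat) :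
    (PySem.Int.bxor a b).testBit k = (a.testBit k ^^ b.testBit k) := by
  rw [pv_bxor_eq_xor]; exact Int.testBit_lxor a b k

theorem pv_testBit_big_false (m k : Nat) (hk : m ≤ k) : Nat.testBit m k = false :=
  Nat.testBit_eq_false_of_lt
    (lt_of_lt_of_le Nat.lt_two_pow_self (Nat.pow_le_pow_right (by norm_num) hk))

theorem pv_int_ext {a b : Int} (h : ∀ k, a.testBit k = b.testBit k) : a = b := by
  rcases a with m | m <;> rcases b with n | n
  · exact congrArg _ (Nat.eq_of_testBit_eq fun i => h i)
  · have hk := h (m + n)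
    simp only [Int.testBit, pv_testBit_big_false m (m + n) (Nat.le_add_right m n),
      pv_testBit_big_false n (m + n) (Nat.le_add_left n m)] at hk
    cases hk
  · have hk := h (m + n)
    simp only [Int.testBit, pv_testBit_big_false m (m + n) (Nat.le_add_right m n),
      pv_testBit_big_false n (m + n) (Nat.le_add_left n m)] at hk
    cases hk
  · refine congrArg _ (Nat.eq_of_testBit_eq fun i => ?_)
    have hk := h i
    simp only [Int.testBit] at hk
    exact Bool.not_inj hk

theorem pv_tb_zero (k : Nat) : (0 : Int).testBit k = false := by
  show (Int.ofNat 0).testBit k = false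
  simp [Int.testBit]

theorem pv_band_eq_zero_iff (a b : Int) :
    PySem.Int.band a b = 0 ↔ ∀ k, (a.testBit k && b.testBit k) = false := by
  constructor
  · intro h k
    rw [← pv_tb_band, h, pv_tb_zero]
  · intro h
    apply pv_int_ext
    intro k
    rw [pv_tb_band, h, pv_tb_zero]

theorem pv_zero_band (a : Int) : PySem.Int.band 0 a = 0 := by
  rw [PySem.Int.band_comm]; exact PySem.Int.band_zero a

theorem pv_zero_bor (a : Int) : PySem.Int.bor 0 a = a := by
  rw [PySem.Int.bor_comm]; exact PySem.Int.bor_zero a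

theorem pv_bor_assoc (a b c : Int) :
    PySem.Int.bor (PySem.Int.bor a b) c = PySem.Int.bor a (PySem.Int.bor b c) := by
  apply pv_int_ext
  intro k
  simp [pv_tb_bor, Bool.or_assoc]

theorem pv_band_bor_split (a b c : Int) :
    PySem.Int.band (PySem.Int.bor a b) c = 0 ↔
      PySem.Int.band a c = 0 ∧ PySem.Int.band b c = 0 := by
  simp only [pv_band_eq_zero_iff]
  constructor
  · intro h
    constructor <;> intro k <;> have hk := h k <;> rw [pv_tb_bor] at hk <;>
      revert hk <;> cases a.testBit k <;> cases b.testBit k <;> cases c.testBit k <;> simp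
  · rintro ⟨h1, h2⟩ k
    have hk1 := h1 k; have hk2 := h2 k
    rw [pv_tb_bor]
    revert hk1 hk2
    cases a.testBit k <;> cases b.testBit k <;> cases c.testBit k <;> simp

theorem pv_bxor_bor_cancel (a b : Int) (h : PySem.Int.band a b = 0) :
    PySem.Int.bxor (PySem.Int.bor a b) a = b := by
  rw [pv_band_eq_zero_iff] at h
  apply pv_int_ext
  intro k
  have hk := h k
  rw [pv_tb_bxor, pv_tb_bor]
  revert hk
  cases a.testBit k <;> cases b.testBit k <;> simp

-- ---- niceness ----

def PvDisj (a b : Int) : Prop := PySem.Int.band a b = 0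

def PvNice (ys : List Int) : Prop := ys.Pairwise PvDisj

def pvMaskOf (ys : List Int) : Int := ys.foldr (fun y m => PySem.Int.bor y m) 0

theorem pvMaskOf_nil : pvMaskOf [] = 0 := rfl

theorem pvMaskOf_cons (y : Int) (ys : List Int) :
    pvMaskOf (y :: ys) = PySem.Int.bor y (pvMaskOf ys) := rfl

theorem pvMaskOf_append_single (ys : List Int) (x : Int) :
    pvMaskOf (ys ++ [x]) = PySem.Int.bor (pvMaskOf ys) x := by
  induction ys with
  | nil => simp [pvMaskOf_cons, pvMaskOf_nil, pv_zero_bor, PySem.Int.bor_zero]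
  | cons y ys ih => simp [pvMaskOf_cons, ih, pv_bor_assoc]

theorem pv_band_maskOf_zero_iff (ys : List Int) (x : Int) :
    PySem.Int.band (pvMaskOf ys) x = 0 ↔ ∀ y ∈ ys, PySem.Int.band y x = 0 := by
  induction ys with
  | nil => simp [pvMaskOf_nil, pv_zero_band]
  | cons y ys ih => simp [pvMaskOf_cons, pv_band_bor_split, ih]

-- ---- A-side characterisation ----

def pvNiceB : Int → List Int → Bool
  | _, [] => true
  | mask, x :: ys => if PySem.Int.band mask x ≠ 0 then false else pvNiceB (PySem.Int.bor mask x) ys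

theorem pvInnerA_eq_niceB (nums : List Int) (idxs : List Int) (mask : Int) :
    pvInnerA nums idxs mask = pvNiceB mask (idxs.map (fun p => PySem.List.pyGetD nums p 0)) := by
  induction idxs generalizing mask with
  | nil => rfl
  | cons p rest ih => simp [pvInnerA, pvNiceB, ih]

theorem pvNiceB_spec (ys : List Int) (mask : Int) :
    pvNiceB mask ys = true ↔ ((∀ y ∈ ys, PySem.Int.band mask y = 0) ∧ PvNice ys) := by
  induction ys generalizing mask with
  | nil => simp [pvNiceB, PvNice]
  | cons x ys ih =>
    simp only [pvNiceB]
    by_cases h : PySem.Int.band mask x = 0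
    · rw [if_neg (not_not_intro h), ih]
      constructor
      · rintro ⟨h1, h2⟩
        refine ⟨?_, ?_⟩
        · intro y hy
          rcases List.mem_cons.mp hy with rfl | hy
          · exact h
          · exact ((pv_band_bor_split mask x y).mp (h1 y hy)).1
        · rw [PvNice, List.pairwise_cons]
          exact ⟨fun y hy => ((pv_band_bor_split mask x y).mp (h1 y hy)).2, h2⟩
      · rintro ⟨h1, h2⟩
        rw [PvNice, List.pairwise_cons] at h2
        exact ⟨fun y hy =>
          (pv_band_bor_split mask x y).mpr ⟨h1 y (List.mem_cons_of_mem _ hy), h2.1 y hy⟩, h2.2⟩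
    · rw [if_pos h]
      constructor
      · intro hF; exact absurd hF (by simp)
      · rintro ⟨h1, _⟩
        exact absurd (h1 x (by simp)) h

theorem pv_window_map (nums : List Int) (s L : Nat) (h : s + L ≤ nums.length) :
    (PySem.List.pyRange (s : Int) ((s : Int) + (L : Int))).map (fun p => PySem.List.pyGetD nums p 0)
      = (nums.drop s).take L := by
  induction L generalizing s with
  | zero =>
    rw [show ((s : Int) + ((0 : Nat) : Int)) = (s : Int) by push_cast; ring]
    rw [PySem.List.pyRange_one_eq_nil (le_refl _)]
    simp
  | succ L ih =>
    have hs : s < nums.length := by omega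
    rw [PySem.List.pyRange_one_cons (by push_cast; omega)]
    rw [List.map_cons]
    rw [PySem.List.pyGetD_eq_getElem nums 0 (by positivity) (by exact_mod_cast hs)]
    rw [List.drop_eq_getElem_cons hs]
    rw [List.take_succ_cons]
    have hrw : ((s : Int) + 1) = ((s + 1 : Nat) : Int) := by push_cast; ring
    have hrw2 : ((s : Int) + ((L + 1 : Nat) : Int)) = (((s + 1 : Nat) : Int) + ((L : Nat) : Int)) := by
      push_cast; ring
    rw [hrw2, hrw, ih (s + 1) (by omega)]
    simp

theorem pvA_iff (nums : List Int) (length : Int) (h2 : ¬ length ≤ 1) :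
    can_form_nice_subarray_py nums length = true ↔
      ∃ s : Nat, s + length.toNat ≤ nums.length ∧ PvNice ((nums.drop s).take length.toNat) := by
  have hL : (length.toNat : Int) = length := Int.toNat_of_nonneg (by omega)
  rw [can_form_nice_subarray_py, if_neg h2, List.any_eq_true]
  constructor
  · rintro ⟨start, hmem, hf⟩
    rw [PySem.List.mem_pyRange_one] at hmem
    obtain ⟨h0, h1⟩ := hmem
    obtain ⟨s, rfl⟩ := Int.eq_ofNat_of_zero_le h0
    refine ⟨s, by omega, ?_⟩
    rw [pvInnerA_eq_niceB,
      show ((s : Int) + length) = ((s : Int) + (length.toNat : Int)) by rw [hL],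
      pv_window_map nums s length.toNat (by omega), pvNiceB_spec] at hf
    exact hf.2
  · rintro ⟨s, hs, hnice⟩
    refine ⟨(s : Int), ?_, ?_⟩
    · rw [PySem.List.mem_pyRange_one]
      constructor
      · positivity
      · omega
    · rw [pvInnerA_eq_niceB,
        show ((s : Int) + length) = ((s : Int) + (length.toNat : Int)) by rw [hL],
        pv_window_map nums s length.toNat hs, pvNiceB_spec]
      exact ⟨fun y _ => pv_zero_band y, hnice⟩

-- ---- suffix helpers ----

theorem pv_suffix_append_split {α : Type} (A : List α) (B t : List α) (h : t <:+ A ++ B) :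
    t <:+ B ∨ ∃ t1, t1 <:+ A ∧ t = t1 ++ B := by
  induction A with
  | nil => left; simpa using h
  | cons a A ih =>
    rcases List.suffix_cons_iff.mp h with heq | h'
    · right; exact ⟨a :: A, List.suffix_refl _, by simpa using heq⟩
    · rcases ih h' with h1 | ⟨t1, ht1, rfl⟩
      · left; exact h1
      · right; exact ⟨t1, ht1.trans (List.suffix_cons a A), rfl⟩

theorem pv_suffix_append_right {α : Type} {l1 l2 : List α} (t : List α) (h : l1 <:+ l2) :
    l1 ++ t <:+ l2 ++ t := by
  obtain ⟨u, hu⟩ := h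
  exact ⟨u, by rw [← List.append_assoc, hu]⟩

-- ---- B-side: shrink spec ----

theorem pvShrinkB_spec (x : Int) : ∀ (window : List Int) (mask : Int),
    mask = pvMaskOf window → PvNice window →
    (pvShrinkB x mask window).1 = pvMaskOf (pvShrinkB x mask window).2 ∧
    (pvShrinkB x mask window).2 <:+ window ∧
    PySem.Int.band (pvMaskOf (pvShrinkB x mask window).2) x = 0 ∧
    (∀ t, t <:+ window → (∀ y ∈ t, PySem.Int.band y x = 0) →
      t <:+ (pvShrinkB x mask window).2) := by
  intro window
  induction window with
  | nil =>
    intro mask hm _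
    have h0 : PySem.Int.band mask x = 0 := by rw [hm, pvMaskOf_nil]; exact pv_zero_band x
    rw [pvShrinkB, if_neg (not_not_intro h0)]
    refine ⟨hm, List.suffix_refl _, by rw [← hm]; exact h0, ?_⟩
    intro t ht _
    exact ht
  | cons w ws ih =>
    intro mask hm hn
    by_cases hc : PySem.Int.band mask x = 0
    · rw [pvShrinkB, if_neg (not_not_intro hc)]
      exact ⟨hm, List.suffix_refl _, by rw [← hm]; exact hc, fun t ht _ => ht⟩
    · rw [pvShrinkB, if_pos hc]
      have hn' : PvNice ws := (List.pairwise_cons.mp hn).2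
      have hdisj : ∀ y ∈ ws, PvDisj w y := (List.pairwise_cons.mp hn).1
      have h1 : PySem.Int.band (pvMaskOf ws) w = 0 :=
        (pv_band_maskOf_zero_iff ws w).mpr
          (fun y hy => by rw [PySem.Int.band_comm]; exact hdisj y hy)
      have hm' : PySem.Int.bxor mask w = pvMaskOf ws := by
        rw [hm, pvMaskOf_cons]
        exact pv_bxor_bor_cancel w (pvMaskOf ws) (by rw [PySem.Int.band_comm]; exact h1)
      obtain ⟨i1, i2, i3, i4⟩ := ih (PySem.Int.bxor mask w) hm' hn'
      refine ⟨i1, i2.trans (List.suffix_cons w ws), i3, ?_⟩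
      intro t ht hdx
      rcases List.suffix_cons_iff.mp ht with rfl | ht'
      · exfalso
        have : PySem.Int.band (pvMaskOf (w :: ws)) x = 0 :=
          (pv_band_maskOf_zero_iff _ x).mpr hdx
        rw [← hm] at this
        exact hc this
      · exact i4 t ht' hdx

-- ---- B-side: loop lemmas ----

theorem pvLoopB_ge_best (xs : List Int) (mask : Int) (window : List Int) (best : Int) :
    best ≤ pvLoopB xs mask window best := by
  induction xs generalizing mask window best with
  | nil => simp [pvLoopB]
  | cons x rest ih =>
    simp only [pvLoopB]
    exact le_trans (le_max_left _ _) (ih _ _ _)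

-- a nice window t that ends somewhere at or beyond the current sliding window
-- keeps that property after one step of B's loop
theorem pv_step_suffix (x : Int) (window w' : List Int)
    (hmax : ∀ t0, t0 <:+ window → (∀ y ∈ t0, PySem.Int.band y x = 0) → t0 <:+ w')
    (t : List Int) (xs1 : List Int) (ht : PvNice t) (hsuf : t <:+ window ++ x :: xs1) :
    t <:+ (w' ++ [x]) ++ xs1 := by
  have hsuf' : t <:+ (window ++ [x]) ++ xs1 := by
    rwa [List.append_assoc, List.singleton_append]
  rcases pv_suffix_append_split (window ++ [x]) xs1 t hsuf' with h1 | ⟨t1, ht1, rfl⟩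
  · exact h1.trans (List.suffix_append _ _)
  · refine pv_suffix_append_right xs1 ?_
    rcases pv_suffix_append_split window [x] t1 ht1 with h2 | ⟨t0, ht0, rfl⟩
    · exact h2.trans (List.suffix_append _ _)
    · have hpre : PvNice (t0 ++ [x]) :=
        ht.sublist ((List.prefix_append _ _).sublist)
      have hall : ∀ y ∈ t0, PySem.Int.band y x = 0 := by
        intro y hy
        have := (List.pairwise_append.mp hpre).2.2 y hy x (by simp)
        exact this
      exact pv_suffix_append_right [x] (hmax t0 ht0 hall)

theorem pvLoopB_lb : ∀ (xs : List Int) (window : List Int) (mask best : Int),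
    mask = pvMaskOf window → PvNice window →
    (window.length : Int) ≤ best → 0 ≤ best →
    ∀ t, PvNice t → (∃ xs1 xs2, xs = xs1 ++ xs2 ∧ t <:+ window ++ xs1) →
    (t.length : Int) ≤ pvLoopB xs mask window best := by
  intro xs
  induction xs with
  | nil =>
    rintro window mask best hm hn hw h0 t ht ⟨xs1, xs2, hx, hsuf⟩
    have hx1 : xs1 = [] := (List.append_eq_nil_iff.mp hx.symm).1
    subst hx1
    rw [List.append_nil] at hsuf
    have := hsuf.length_le
    simp only [pvLoopB]
    calc (t.length : Int) ≤ (window.length : Int) := by exact_mod_cast this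
      _ ≤ best := hw
  | cons x rest ih =>
    rintro window mask best hm hn hw h0 t ht ⟨xs1, xs2, hx, hsuf⟩
    obtain ⟨s1, s2, s3, s4⟩ := pvShrinkB_spec x window mask hm hn
    simp only [pvLoopB]
    have hm' : PySem.Int.bor (pvShrinkB x mask window).1 x
        = pvMaskOf ((pvShrinkB x mask window).2 ++ [x]) := by
      rw [s1, pvMaskOf_append_single]
    have hn' : PvNice ((pvShrinkB x mask window).2 ++ [x]) := by
      rw [PvNice, List.pairwise_append]
      exact ⟨hn.sublist s2.sublist, List.pairwise_singleton _ _,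
        fun a ha b hb => by
          rw [List.mem_singleton.mp hb]
          exact (pv_band_maskOf_zero_iff _ x).mp s3 a ha⟩
    cases xs1 with
    | nil =>
      rw [List.append_nil] at hsuf
      simp only [List.nil_append] at hx
      calc (t.length : Int) ≤ (window.length : Int) := by exact_mod_cast hsuf.length_le
        _ ≤ best := hw
        _ ≤ max best (((pvShrinkB x mask window).2 ++ [x]).length : Int) := le_max_left _ _
        _ ≤ _ := pvLoopB_ge_best _ _ _ _
    | cons y xs1' =>
      rw [List.cons_append] at hx
      injection hx with h1 h2
      subst h1
      exact ih _ _ _ hm' hn' (le_max_right _ _)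
        (le_trans h0 (le_max_left _ _)) t ht
        ⟨xs1', xs2, h2, pv_step_suffix x window _ s4 t xs1' ht hsuf⟩

theorem pvLoopB_ub : ∀ (xs : List Int) (window : List Int) (mask best : Int),
    mask = pvMaskOf window → PvNice window →
    pvLoopB xs mask window best ≤ best ∨
      ∃ t xs1 xs2, xs = xs1 ++ xs2 ∧ t <:+ window ++ xs1 ∧ PvNice t ∧
        pvLoopB xs mask window best ≤ (t.length : Int) := by
  intro xs
  induction xs with
  | nil =>
    intro window mask best _ _
    left
    simp [pvLoopB]
  | cons x rest ih =>
    intro window mask best hm hn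
    obtain ⟨s1, s2, s3, s4⟩ := pvShrinkB_spec x window mask hm hn
    have hm' : PySem.Int.bor (pvShrinkB x mask window).1 x
        = pvMaskOf ((pvShrinkB x mask window).2 ++ [x]) := by
      rw [s1, pvMaskOf_append_single]
    have hn' : PvNice ((pvShrinkB x mask window).2 ++ [x]) := by
      rw [PvNice, List.pairwise_append]
      exact ⟨hn.sublist s2.sublist, List.pairwise_singleton _ _,
        fun a ha b hb => by
          rw [List.mem_singleton.mp hb]
          exact (pv_band_maskOf_zero_iff _ x).mp s3 a ha⟩
    have hwsuf : (pvShrinkB x mask window).2 ++ [x] <:+ window ++ [x] :=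
      pv_suffix_append_right [x] s2
    simp only [pvLoopB]
    rcases ih ((pvShrinkB x mask window).2 ++ [x]) _ _ hm' hn' with hle | ⟨t, xs1', xs2, hxe, hsuf, hnt, hres⟩
    · rcases le_max_iff.mp hle with h | h
      · left; exact h
      · right
        refine ⟨(pvShrinkB x mask window).2 ++ [x], [x], rest, by simp, hwsuf, hn', h⟩
    · right
      refine ⟨t, x :: xs1', xs2, by rw [hxe, List.cons_append], ?_, hnt, hres⟩
      have : ((pvShrinkB x mask window).2 ++ [x]) ++ xs1' <:+ (window ++ [x]) ++ xs1' :=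
        pv_suffix_append_right xs1' hwsuf
      have h2 := hsuf.trans this
      rwa [List.append_assoc, List.singleton_append] at h2

-- ===== VERDICT (by name: the statement is the Claim_ definition above) =====
theorem can_form_nice_subarray_py_spec : Claim_equal_can_form_nice_subarray_py := by
  intro nums length _
  rw [Spec_can_form_nice_subarray_py]
  by_cases hl : length ≤ 1
  · rw [can_form_nice_subarray_py, can_form_nice_subarray_py_alt, if_pos hl, if_pos hl]
  · rw [Bool.eq_iff_iff, pvA_iff nums length hl]
    rw [can_form_nice_subarray_py_alt, if_neg hl, decide_eq_true_iff]
    have hL : (length.toNat : Int) = length := Int.toNat_of_nonneg (by omega)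
    constructor
    · rintro ⟨s, hs, hnice⟩
      have hlen : ((nums.drop s).take length.toNat).length = length.toNat := by
        simp only [List.length_take, List.length_drop]
        omega
      have hdec : nums = nums.take (s + length.toNat) ++ nums.drop (s + length.toNat) :=
        (List.take_append_drop _ _).symm
      have hsuf : (nums.drop s).take length.toNat <:+ [] ++ nums.take (s + length.toNat) := by
        rw [List.nil_append, List.take_add]
        exact List.suffix_append _ _
      have := pvLoopB_lb nums [] 0 0 pvMaskOf_nil.symm List.Pairwise.nil
        (by simp) (le_refl 0) _ hnice
        ⟨nums.take (s + length.toNat), nums.drop (s + length.toNat), hdec, hsuf⟩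
      rwa [hlen, hL] at this
    · intro hres
      rcases pvLoopB_ub nums [] 0 0 pvMaskOf_nil.symm List.Pairwise.nil with hle | ⟨t, xs1, xs2, hxe, hsuf, hnt, hrt⟩
      · omega
      · rw [List.nil_append] at hsuf
        obtain ⟨u, hu⟩ := hsuf
        have hlt : length.toNat ≤ t.length := by omega
        refine ⟨u.length, ?_, ?_⟩
        · have h1 : u.length + t.length = xs1.length := by
            rw [← hu]; simp
          have h2 : xs1.length + xs2.length = nums.length := by
            rw [hxe]; simp
          omega
        · have hdrop : nums.drop u.length = t ++ xs2 := by
            rw [hxe, ← hu, List.append_assoc, List.drop_left]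
          rw [hdrop, List.take_append_of_le_length hlt]
          exact List.Pairwise.sublist (List.take_prefix _ _).sublist hnt
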